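-- pv_equiv track=rewrite | github.com/savithasam88/CLEVR-POC | clevr-poc-dataset-gen/image_generation/scene_info.py | compute_all_similar
-- ===== SOURCE A (Python) =====
-- def compute_all_similar(scene_struct):
--     all_similar = {}
--     for p in ['color', 'size', 'material', 'shape']:
--         sim_p = []
--         objects = scene_struct['objects']
--         for i, obj in enumerate(objects):
--             obj_sim_p = []
--             for j, obj_other in enumerate(objects):
--                 if i == j:
--                     continue
--                 else:
--                     if obj[p]==obj_other[p]:
--                         obj_sim_p.append(j)
--             sim_p.append(obj_sim_p)
--         all_similar[p] = sim_p
--     return all_similar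
-- ===== SOURCE B (Python) =====
-- def compute_all_similar(scene_struct):
--     objects = scene_struct['objects']
--     all_similar = {}
--     for p in ['color', 'size', 'material', 'shape']:
--         groups = {}
--         for i, obj in enumerate(objects):
--             groups.setdefault(obj.get(p, ''), []).append(i)
--         all_similar[p] = [[j for j in groups[obj.get(p, '')] if j != i]
--                           for i, obj in enumerate(objects)]
--     return all_similar
-- ===== Notes on version B (the rewrite author's own statement) =====
-- stated objective: alternative
-- what changed: Replaces the all-pairs comparison per property by a single grouping pass (a dict mapping each attribute value to its ascending list of object indices), then emits each object's group with its own index removed.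
import Mathlib
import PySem

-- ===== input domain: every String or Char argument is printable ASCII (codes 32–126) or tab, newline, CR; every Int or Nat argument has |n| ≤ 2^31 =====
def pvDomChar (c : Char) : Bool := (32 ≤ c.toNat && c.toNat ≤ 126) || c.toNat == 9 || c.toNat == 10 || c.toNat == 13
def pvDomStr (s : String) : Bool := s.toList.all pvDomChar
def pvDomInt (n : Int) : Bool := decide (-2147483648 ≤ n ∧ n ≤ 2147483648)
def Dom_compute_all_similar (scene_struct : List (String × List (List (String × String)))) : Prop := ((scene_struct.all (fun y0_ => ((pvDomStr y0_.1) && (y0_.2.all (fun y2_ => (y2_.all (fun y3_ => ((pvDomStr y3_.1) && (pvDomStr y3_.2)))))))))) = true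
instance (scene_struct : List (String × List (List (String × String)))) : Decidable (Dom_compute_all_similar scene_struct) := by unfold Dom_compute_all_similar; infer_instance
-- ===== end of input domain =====

-- B replaces A's quadratic all-pairs comparison per property by first grouping object
-- indices by attribute value in a dict, then emitting each object's group minus itself.

-- ===== PORT A =====
def compute_all_similar (scene_struct : List (String × List (List (String × String)))) : List (String × List (List Int)) :=
  ((["color", "size", "material", "shape"]).foldl (fun all_similar p =>
    let objects := (PySem.Dict.mk scene_struct).getD "objects" []
    let sim_p := (PySem.List.enumerate objects).foldl (fun sim_p iobj =>
      let obj_sim_p := (PySem.List.enumerate objects).foldl (fun obj_sim_p jobj =>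
        if iobj.1 == jobj.1 then obj_sim_p
        else if (PySem.Dict.mk iobj.2).getD p "" == (PySem.Dict.mk jobj.2).getD p "" then
          obj_sim_p ++ [jobj.1]
        else obj_sim_p) []
      sim_p ++ [obj_sim_p]) []
    all_similar.insert p sim_p) PySem.Dict.empty).items

-- ===== PORT B =====
def compute_all_similar_alt (scene_struct : List (String × List (List (String × String)))) : List (String × List (List Int)) :=
  let objects := (PySem.Dict.mk scene_struct).getD "objects" []
  (["color", "size", "material", "shape"]).map (fun p =>
    let groups := (PySem.List.enumerate objects).foldl (fun groups iobj =>
      groups.modify ((PySem.Dict.mk iobj.2).getD p "") [] (· ++ [iobj.1])) PySem.Dict.empty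
    (p, (PySem.List.enumerate objects).map (fun iobj =>
      (groups.getD ((PySem.Dict.mk iobj.2).getD p "") []).filter (fun j => j != iobj.1))))

-- ===== PRECONDITION & SPEC =====
-- Pre_ excludes exactly the inputs where Python A raises KeyError: no "objects" entry, or
-- at least two objects and one of them missing one of the four property keys (with a single
-- object A's pair loop never reads any property key, so A returns there).
def Pre_compute_all_similar (scene_struct : List (String × List (List (String × String)))) : Prop :=
  (scene_struct.find? (fun kv => kv.1 == "objects")).isSome ∧
  ((((scene_struct.find? (fun kv => kv.1 == "objects")).map Prod.snd).getD []).length ≤ 1 ∨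
   ∀ obj ∈ (((scene_struct.find? (fun kv => kv.1 == "objects")).map Prod.snd).getD []),
     ∀ p ∈ ["color", "size", "material", "shape"],
       (obj.find? (fun kv => kv.1 == p)).isSome)
instance (scene_struct : List (String × List (List (String × String)))) : Decidable (Pre_compute_all_similar scene_struct) := by unfold Pre_compute_all_similar; infer_instance

def pvWitness_compute_all_similar : (List (String × List (List (String × String)))) :=
  [("objects", [[("color", "red"), ("size", "small"), ("material", "rubber"), ("shape", "cube")],
                [("color", "red"), ("size", "large"), ("material", "metal"), ("shape", "cube")]])]

def Spec_compute_all_similar (scene_struct : List (String × List (List (String × String)))) (out : List (String × List (List Int))) : Prop := out = compute_all_similar_alt scene_struct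
instance (scene_struct : List (String × List (List (String × String)))) (out : List (String × List (List Int))) : Decidable (Spec_compute_all_similar scene_struct out) := by unfold Spec_compute_all_similar; infer_instance

-- ===== CLAIM (what is proved, stated in full; the proofs are below) =====
def Claim_equal_compute_all_similar : Prop := ∀ (scene_struct : List (String × List (List (String × String)))), Dom_compute_all_similar scene_struct → Pre_compute_all_similar scene_struct → Spec_compute_all_similar scene_struct (compute_all_similar scene_struct)


-- ===== LEMMAS AND PROOFS =====

-- B's group for value v lists, in order, the indices of the objects whose key is v.
theorem groups_getD (objects : List (List (String × String))) (p v : String) :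
    ((PySem.List.enumerate objects).foldl (fun groups iobj =>
      groups.modify ((PySem.Dict.mk iobj.2).getD p "") [] (· ++ [iobj.1])) PySem.Dict.empty).getD v []
    = (((PySem.List.enumerate objects).filter
        (fun x => (PySem.Dict.mk x.2).getD p "" == v)).map (·.1)) := by
  have h := PySem.Dict.getD_foldl_modify_append
      (l := (PySem.List.enumerate objects).map
        (fun x => ((PySem.Dict.mk x.2).getD p "", x.1)))
      (d := PySem.Dict.empty) (c := v)
  rw [List.foldl_map] at h
  simpa [List.filter_map, Function.comp] using h

-- A's inner loop over all j collects exactly the indices j ≠ i with equal key.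
theorem a_inner (objects : List (List (String × String))) (p : String) (i : Int) (v : String) :
    ((PySem.List.enumerate objects).foldl (fun obj_sim_p jobj =>
        if i == jobj.1 then obj_sim_p
        else if v == (PySem.Dict.mk jobj.2).getD p "" then obj_sim_p ++ [jobj.1]
        else obj_sim_p) [])
    = (((PySem.List.enumerate objects).filter
        (fun x => !(i == x.1) && (v == (PySem.Dict.mk x.2).getD p ""))).map (·.1)) := by
  have hstep : (fun (obj_sim_p : List Int) (jobj : Int × List (String × String)) =>
        if i == jobj.1 then obj_sim_p
        else if v == (PySem.Dict.mk jobj.2).getD p "" then obj_sim_p ++ [jobj.1]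
        else obj_sim_p)
      = (fun obj_sim_p jobj =>
        if (!(i == jobj.1) && (v == (PySem.Dict.mk jobj.2).getD p "")) then obj_sim_p ++ [jobj.1]
        else obj_sim_p) := by
    funext acc x
    by_cases h1 : i == x.1 <;> by_cases h2 : v == (PySem.Dict.mk x.2).getD p "" <;>
      simp [h1, h2]
  rw [hstep, PySem.List.foldl_append_if]
  simp

-- per-property equality of the two computations
theorem sim_p_eq (objects : List (List (String × String))) (p : String) :
    ((PySem.List.enumerate objects).foldl (fun sim_p iobj =>
      let obj_sim_p := (PySem.List.enumerate objects).foldl (fun obj_sim_p jobj =>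
        if iobj.1 == jobj.1 then obj_sim_p
        else if (PySem.Dict.mk iobj.2).getD p "" == (PySem.Dict.mk jobj.2).getD p "" then
          obj_sim_p ++ [jobj.1]
        else obj_sim_p) []
      sim_p ++ [obj_sim_p]) [])
    = ((PySem.List.enumerate objects).map (fun iobj =>
        (((PySem.List.enumerate objects).foldl (fun groups jobj =>
          groups.modify ((PySem.Dict.mk jobj.2).getD p "") [] (· ++ [jobj.1]))
          PySem.Dict.empty).getD ((PySem.Dict.mk iobj.2).getD p "") []).filter
            (fun j => j != iobj.1))) := by
  rw [PySem.List.foldl_append_singleton_eq_map]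
  simp only [List.nil_append]
  apply List.map_congr_left
  intro iobj _
  rw [a_inner, groups_getD, List.filter_map, List.filter_filter]
  congr 1
  apply List.filter_congr
  intro x _
  simp only [Function.comp]
  by_cases h1 : iobj.1 = x.1 <;>
    by_cases h2 : (PySem.Dict.mk iobj.2).getD p "" = (PySem.Dict.mk x.2).getD p "" <;>
      simp [h1, h2, bne, Bool.beq_comm]

-- ===== VERDICT (by name: the statement is the Claim_ definition above) =====
theorem compute_all_similar_spec : Claim_equal_compute_all_similar := by
  intro s _ _
  show compute_all_similar s = compute_all_similar_alt s
  unfold compute_all_similar compute_all_similar_alt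
  simp only [List.foldl_cons, List.foldl_nil, List.map_cons, List.map_nil]
  rw [sim_p_eq, sim_p_eq, sim_p_eq, sim_p_eq]
  simp [PySem.Dict.items_insert_of_not_contains, PySem.Dict.contains_insert,
        PySem.Dict.empty]
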